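-- pv_equiv track=rewrite | github.com/hamzaplojovic/hackerrank | fairRations.py | fairRations
-- ===== SOURCE A (Python) =====
-- def fairRations(B):
--     count = 0
--     for i in range(len(B)-1):
--         if B[i] % 2 != 0:
--             B[i] += 1
--             B[i+1] += 1
--             count += 2
--     if B[-1] % 2 != 0:
--         return "NO"
--     else:
--         return str(count)
-- ===== SOURCE B (Python) =====
-- def fairRations(B):
--     # Running parity accumulator instead of write-ahead mutation of B[i+1].
--     # Note: unlike A, this does not mutate B in place; equivalence is about the
--     # return value only.
--     p = 0
--     odd = 0
--     for x in B[:-1]: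
--         p = (p + x) % 2
--         odd += p
--     if (p + B[-1]) % 2 != 0:
--         return "NO"
--     return str(2 * odd)
-- ===== Notes on version B (the rewrite author's own statement) =====
-- stated objective: simpler
-- what changed: Replaces A's in-place neighbour mutation of the array and its post-loop read of the mutated last element with a pure single pass threading a prefix-parity accumulator p and a count of odd prefixes; the answer is NO iff the total parity is odd, else twice the odd-prefix count. Pre_ excludes only the empty list, on which both A and B raise IndexError reading the last element. B does not mutate its argument (A does); only the return value is claimed equal.
import Mathlib
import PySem

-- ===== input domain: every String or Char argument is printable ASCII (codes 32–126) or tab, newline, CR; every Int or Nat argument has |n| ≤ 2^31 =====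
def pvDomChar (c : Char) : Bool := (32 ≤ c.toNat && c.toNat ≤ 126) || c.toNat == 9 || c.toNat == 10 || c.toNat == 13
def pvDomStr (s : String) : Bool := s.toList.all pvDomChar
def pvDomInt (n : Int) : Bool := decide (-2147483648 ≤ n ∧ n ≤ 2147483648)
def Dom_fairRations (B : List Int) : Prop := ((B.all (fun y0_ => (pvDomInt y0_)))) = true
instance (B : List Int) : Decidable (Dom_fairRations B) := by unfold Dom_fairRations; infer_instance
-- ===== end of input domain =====

-- B changes the decomposition: a pure prefix-parity accumulator pass instead of
-- A's in-place neighbour mutation; return values proved equal (B does not mutate).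

-- ===== PORT A =====
-- loop body of A: if B[i] % 2 != 0: B[i] += 1; B[i+1] += 1; count += 2
def stepA (s : List Int × Int) (i : Int) : List Int × Int :=
  if PySem.Int.mod (PySem.List.pyGetD s.1 i 0) 2 ≠ 0 then
    let b1 := PySem.List.pySetD s.1 i (PySem.List.pyGetD s.1 i 0 + 1)
    let b2 := PySem.List.pySetD b1 (i + 1) (PySem.List.pyGetD b1 (i + 1) 0 + 1)
    (b2, s.2 + 2)
  else s

def fairRations (B : List Int) : String :=
  let s := (PySem.List.pyRange 0 ((B.length : Int) - 1) 1).foldl stepA (B, 0)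
  match PySem.List.pyGet? s.1 (-1) with
  | some last => if PySem.Int.mod last 2 ≠ 0 then "NO" else PySem.Int.toStr s.2
  | none => ""   -- reading the last element of an empty list is an IndexError; excluded by Pre_

-- ===== PORT B =====
-- loop body of B: p = (p + x) % 2; odd += p
def stepB (s : Int × Int) (x : Int) : Int × Int :=
  let p := PySem.Int.mod (s.1 + x) 2
  (p, s.2 + p)

def fairRations_alt (B : List Int) : String :=
  let s := (PySem.List.slice B none (some (-1))).foldl stepB (0, 0)
  match PySem.List.pyGet? B (-1) with
  | some last =>
      if PySem.Int.mod (s.1 + last) 2 ≠ 0 then "NO" else PySem.Int.toStr (2 * s.2)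
  | none => ""   -- reading the last element of an empty list is an IndexError; excluded by Pre_

-- ===== PRECONDITION & SPEC =====
-- Pre_ excludes only the empty list, on which both A and B raise IndexError reading the last element.
def Pre_fairRations (B : List Int) : Prop := B ≠ []
instance (B : List Int) : Decidable (Pre_fairRations B) := by unfold Pre_fairRations; infer_instance
def pvWitness_fairRations : List Int := [1, 2]

def Spec_fairRations (B : List Int) (out : String) : Prop := out = fairRations_alt B
instance (B : List Int) (out : String) : Decidable (Spec_fairRations B out) := by unfold Spec_fairRations; infer_instance

-- ===== CLAIM (what is proved, stated in full; the proofs are below) =====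
def Claim_equal_fairRations : Prop := ∀ (B : List Int), Dom_fairRations B → Pre_fairRations B → Spec_fairRations B (fairRations B)


-- ===== LEMMAS AND PROOFS =====

-- Structural recursion equal to A's index loop (proved below in foldl_stepA_eq_runA).
def runA : List Int → Int → List Int × Int
  | [], cnt => ([], cnt)
  | [x], cnt => ([x], cnt)
  | x :: y :: t, cnt =>
    if PySem.Int.mod x 2 ≠ 0 then
      let r := runA ((y + 1) :: t) (cnt + 2)
      ((x + 1) :: r.1, r.2)
    else
      let r := runA (y :: t) cnt
      (x :: r.1, r.2)
  termination_by l _ => l.length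
  decreasing_by all_goals simp

theorem getLast?_cons_of_ne_nil {a : Type} (x : a) {l : List a} (h : l ≠ []) :
    (x :: l).getLast? = l.getLast? := by
  cases l with
  | nil => exact absurd rfl h
  | cons b t => simp [List.getLast?_cons_cons]

-- A's fold over range(len(B)-1), generalized over an already-finished prefix P.
theorem foldl_stepA_eq_runA (t : List Int) : ∀ (x : Int) (P : List Int) (cnt : Int),
    (PySem.List.pyRange (P.length : Int) ((P.length : Int) + ((t.length : Int) + 1) - 1) 1).foldl
        stepA (P ++ x :: t, cnt)
      = (P ++ (runA (x :: t) cnt).1, (runA (x :: t) cnt).2) := by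
  induction t with
  | nil =>
    intro x P cnt
    rw [PySem.List.pyRange_one_eq_nil (by simp)]
    simp [runA]
  | cons y u ih =>
    intro x P cnt
    rw [PySem.List.pyRange_one_cons (by simp [List.length_cons]; push_cast; omega)]
    have hget : PySem.List.pyGetD (P ++ x :: y :: u) (P.length : Int) 0 = x := by
      simp only [PySem.List.pyGetD_natCast, List.getD_eq_getElem?_getD]
      rw [List.getElem?_append_right (le_refl _)]
      simp
    have hcast : ((P.length : Int) + 1) = (((P.length + 1 : Nat)) : Int) := by push_cast; ring
    simp only [List.foldl_cons, stepA, hget]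
    by_cases hodd : PySem.Int.mod x 2 ≠ 0
    · simp only [if_pos hodd]
      have hset1 : PySem.List.pySetD (P ++ x :: y :: u) (P.length : Int) (x + 1)
          = P ++ (x + 1) :: y :: u := by
        rw [PySem.List.pySetD_natCast, List.set_append_right _ _ (le_refl _)]
        simp
      rw [hset1]
      have hget2 : PySem.List.pyGetD (P ++ (x + 1) :: y :: u) ((P.length : Int) + 1) 0 = y := by
        rw [hcast]
        simp only [PySem.List.pyGetD_natCast, List.getD_eq_getElem?_getD]
        rw [List.getElem?_append_right (by omega)]
        simp [Nat.add_sub_cancel_left]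
      have hset2 : PySem.List.pySetD (P ++ (x + 1) :: y :: u) ((P.length : Int) + 1) (y + 1)
          = P ++ (x + 1) :: (y + 1) :: u := by
        rw [hcast, PySem.List.pySetD_natCast, List.set_append_right _ _ (by omega)]
        simp [Nat.add_sub_cancel_left]
      rw [hget2, hset2]
      have hP : P ++ (x + 1) :: (y + 1) :: u = (P ++ [x + 1]) ++ (y + 1) :: u := by simp
      have hstart : ((P.length : Int) + 1) = (((P ++ [x + 1]).length : Nat) : Int) := by simp
      have hstop : ((P.length : Int) + ((((y :: u).length : Nat) : Int) + 1) - 1)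
          = (((P ++ [x + 1]).length : Nat) : Int) + (((u.length : Nat) : Int) + 1) - 1 := by
        simp [List.length_cons]; push_cast; ring
      rw [hP, hstart, hstop, ih (y + 1) (P ++ [x + 1]) (cnt + 2)]
      have h2 := PySem.Int.mod_eq_emod_of_pos (a := x) (b := 2) (by norm_num)
      rw [h2] at hodd
      have hx : x % 2 = 1 := by omega
      rw [runA]
      simp [hx]
    · simp only [if_neg hodd]
      have hP : P ++ x :: y :: u = (P ++ [x]) ++ y :: u := by simp
      have hstart : ((P.length : Int) + 1) = (((P ++ [x]).length : Nat) : Int) := by simp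
      have hstop : ((P.length : Int) + ((((y :: u).length : Nat) : Int) + 1) - 1)
          = (((P ++ [x]).length : Nat) : Int) + (((u.length : Nat) : Int) + 1) - 1 := by
        simp [List.length_cons]; push_cast; ring
      rw [hP, hstart, hstop, ih y (P ++ [x]) cnt]
      have h2 := PySem.Int.mod_eq_emod_of_pos (a := x) (b := 2) (by norm_num)
      rw [h2] at hodd
      have hx : ¬ x % 2 = 1 := by omega
      rw [runA]
      simp [hx]

-- runA versus B's prefix-parity fold.
theorem runA_vs_stepB (t : List Int) : ∀ (x p cnt odd : Int), (p = 0 ∨ p = 1) →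
    (runA ((x + p) :: t) cnt).2
        = cnt + 2 * (((x :: t).dropLast.foldl stepB (p, odd)).2 - odd)
    ∧ (runA ((x + p) :: t) cnt).1.getLast?
        = some ((x :: t).getLast (List.cons_ne_nil x t)
            + ((x :: t).dropLast.foldl stepB (p, odd)).1) := by
  induction t with
  | nil =>
    intro x p cnt odd hp
    constructor
    · simp [runA]
    · simp [runA, stepB]
  | cons y u ih =>
    intro x p cnt odd hp
    have e2 : PySem.Int.mod (p + x) 2 = (p + x) % 2 :=
      PySem.Int.mod_eq_emod_of_pos (by norm_num)
    have hmod : PySem.Int.mod (x + p) 2 = (p + x) % 2 := by rw [add_comm]; exact e2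
    have hdrop : (x :: y :: u).dropLast = x :: (y :: u).dropLast := by simp
    have hstep : List.foldl stepB (p, odd) ((x :: y :: u).dropLast)
        = List.foldl stepB ((p + x) % 2, odd + (p + x) % 2) ((y :: u).dropLast) := by
      rw [hdrop, List.foldl_cons]
      simp [stepB, e2]
    have hLast : (x :: y :: u).getLast (List.cons_ne_nil x (y :: u))
        = (y :: u).getLast (List.cons_ne_nil y u) := rfl
    rcases (show (p + x) % 2 = 0 ∨ (p + x) % 2 = 1 by omega) with h0 | h1
    · -- loaf is even after carry: no distribution here
      have hcond : ¬ PySem.Int.mod (x + p) 2 ≠ 0 := by rw [hmod, h0]; simp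
      obtain ⟨ih1, ih2⟩ := ih y 0 cnt (odd + 0) (Or.inl rfl)
      simp only [add_zero] at ih1 ih2
      rw [h0] at hstep
      simp only [add_zero] at hstep
      constructor
      · rw [runA]
        simp only [if_neg hcond, hstep]
        exact ih1
      · rw [runA]
        simp only [if_neg hcond]
        have hne2 : (runA (y :: u) cnt).1 ≠ [] := by
          intro hnil; rw [hnil] at ih2; simp at ih2
        rw [getLast?_cons_of_ne_nil _ hne2, ih2, hstep, hLast]
    · -- loaf is odd after carry: distribute two loaves
      have hcond : PySem.Int.mod (x + p) 2 ≠ 0 := by rw [hmod, h1]; simp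
      obtain ⟨ih1, ih2⟩ := ih y 1 (cnt + 2) (odd + 1)  (Or.inr rfl)
      rw [h1] at hstep
      constructor
      · rw [runA]
        simp only [if_pos hcond, hstep, ih1]
        ring
      · rw [runA]
        simp only [if_pos hcond]
        have hne2 : (runA ((y + 1) :: u) (cnt + 2)).1 ≠ [] := by
          intro hnil; rw [hnil] at ih2; simp at ih2
        rw [getLast?_cons_of_ne_nil _ hne2, ih2, hstep, hLast]

-- ===== VERDICT (by name: the statement is the Claim_ definition above) =====
theorem fairRations_spec : Claim_equal_fairRations := by
  intro B _ hpre
  unfold Spec_fairRations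
  cases B with
  | nil => exact absurd rfl hpre
  | cons x t =>
    obtain ⟨hv1, hv2⟩ := runA_vs_stepB t x 0 0 0 (Or.inl rfl)
    simp only [add_zero, zero_add, sub_zero] at hv1 hv2
    rw [add_comm] at hv2
    have hrun := foldl_stepA_eq_runA t x [] 0
    simp only [List.length_nil, Nat.cast_zero, List.nil_append] at hrun
    have hlen : (((x :: t).length : Nat) : Int) - 1 = 0 + ((t.length : Int) + 1) - 1 := by
      simp [List.length_cons]
    have hlast : (x :: t).getLast? = some ((x :: t).getLast (List.cons_ne_nil x t)) := by
      simp [List.getLast?_eq_some_getLast]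
    unfold fairRations fairRations_alt
    simp only [hlen, hrun, PySem.List.slice_to_neg_one, PySem.List.pyGet?_neg_one,
      hv1, hv2, hlast]
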